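-- pv_equiv track=rewrite | github.com/VCNC-LONDON/vcnc_work | research/code test/toss_nxt_de_2022/test/python1.py | solution
-- ===== SOURCE A (Python) =====
-- def solution(skills, team, k):
--     answer = 0
--
--     for i in range(len(skills) - k + 1) :
--         player = [x+i+1 for x in range(k)]
--         player_skill = skills[i:i+k]
--
--         if set(team).issubset(player) :
--             power = sum(player_skill) * 2
--         else :
--             power = sum(player_skill)
--
--         if power > answer :
--             answer = power
--
--     return answer
-- ===== SOURCE B (Python) =====
-- def solution(skills, team, k):
--     # Sliding window via prefix sums: O(n + m) instead of rebuilding the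
--     # window player list and its sum for every i.
--     n = len(skills)
--     prefix = [0]
--     for s in skills:
--         prefix.append(prefix[-1] + s)
--     if team:
--         lo, hi = min(team), max(team)
--     answer = 0
--     for i in range(n - k + 1):
--         power = prefix[i + k] - prefix[i]
--         if not team or (hi - k <= i <= lo - 1):
--             power *= 2
--         if power > answer:
--             answer = power
--     return answer
-- ===== Notes on version B (the rewrite author's own statement) =====
-- stated objective: faster
-- what changed: B precomputes a prefix-sum array and reduces the per-window subset test to two comparisons against min(team)/max(team) computed once, instead of rebuilding the window's player list, its slice sum and a set-subset test for every window.
-- outside the precondition, e.g. on solution([5, 3], [], -1): A returns 10, B raises IndexError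
import Mathlib
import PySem

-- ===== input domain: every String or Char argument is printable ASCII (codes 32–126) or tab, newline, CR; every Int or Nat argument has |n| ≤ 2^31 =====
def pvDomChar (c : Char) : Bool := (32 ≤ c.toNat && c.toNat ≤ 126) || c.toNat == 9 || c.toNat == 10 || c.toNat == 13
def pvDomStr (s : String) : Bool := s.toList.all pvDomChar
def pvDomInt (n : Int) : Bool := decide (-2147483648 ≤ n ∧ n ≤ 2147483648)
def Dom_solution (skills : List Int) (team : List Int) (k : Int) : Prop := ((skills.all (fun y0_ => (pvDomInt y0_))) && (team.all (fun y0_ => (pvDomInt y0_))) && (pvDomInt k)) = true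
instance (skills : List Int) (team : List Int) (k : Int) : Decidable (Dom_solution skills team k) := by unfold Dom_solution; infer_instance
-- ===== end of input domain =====

-- B replaces A's per-window player-list/slice/set work by one prefix-sum array and a
-- min/max range test computed once (asymptotically less work per window).


-- ===== PORT A =====
def solution (skills : List Int) (team : List Int) (k : Int) : Int :=
  (PySem.List.pyRange 0 ((skills.length : Int) - k + 1) 1).foldl
    (fun answer i =>
      let player := (PySem.List.pyRange 0 k 1).map (fun x => x + i + 1)
      let player_skill := PySem.List.slice skills (some i) (some (i + k))
      let power := if PySem.Set.issubset (PySem.Set.ofList team) player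
                   then player_skill.sum * 2 else player_skill.sum
      if power > answer then power else answer)
    0

-- ===== PORT B =====
def solution_alt (skills : List Int) (team : List Int) (k : Int) : Int :=
  let n : Int := skills.length
  let pre := skills.foldl (fun p s => p ++ [PySem.List.pyGetD p (-1) 0 + s]) [(0 : Int)]
  let lo := (PySem.List.min? team (fun x => x)).getD 0
  let hi := (PySem.List.max? team (fun x => x)).getD 0
  (PySem.List.pyRange 0 (n - k + 1) 1).foldl
    (fun answer i =>
      let power := PySem.List.pyGetD pre (i + k) 0 - PySem.List.pyGetD pre i 0
      let power := if team.isEmpty || (decide (hi - k ≤ i) && decide (i ≤ lo - 1))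
                   then power * 2 else power
      if power > answer then power else answer)
    0

-- ===== PRECONDITION & SPEC =====
-- Pre_ excludes k < 0, on which A's slice skills[i:i+k] wraps to end-relative indices and A
-- returns accidental window sums while B's prefix-sum indexing raises IndexError.
def Pre_solution (skills : List Int) (team : List Int) (k : Int) : Prop := 0 ≤ k
instance (skills : List Int) (team : List Int) (k : Int) : Decidable (Pre_solution skills team k) := by unfold Pre_solution; infer_instance
def pvWitness_solution : List Int × List Int × Int := ([1, 5, 3, 2], [2, 3], 2)

def Spec_solution (skills : List Int) (team : List Int) (k : Int) (out : Int) : Prop := out = solution_alt skills team k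
instance (skills : List Int) (team : List Int) (k : Int) (out : Int) : Decidable (Spec_solution skills team k out) := by unfold Spec_solution; infer_instance

-- ===== CLAIM (what is proved, stated in full; the proofs are below) =====
def Claim_equal_solution : Prop := ∀ (skills : List Int) (team : List Int) (k : Int), Dom_solution skills team k → Pre_solution skills team k → Spec_solution skills team k (solution skills team k)

-- ===== LEMMAS AND PROOFS =====

-- B's prefix list is the list of the partial sums of `skills`.
theorem pv_prefix_eq (skills : List Int) :
    skills.foldl (fun p s => p ++ [PySem.List.pyGetD p (-1) 0 + s]) [(0 : Int)]
      = (List.range (skills.length + 1)).map (fun j => ((skills.take j).sum)) := by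
  induction skills using List.reverseRecOn with
  | nil => simp
  | append_singleton xs x ih =>
    rw [List.foldl_append, ih]
    simp only [List.foldl_cons, List.foldl_nil, List.length_append, List.length_cons,
      List.length_nil, Nat.zero_add]
    have hne : (List.range (xs.length + 1)).map (fun j => ((xs.take j).sum)) ≠ [] := by simp
    have hlast : PySem.List.pyGetD
        ((List.range (xs.length + 1)).map (fun j => ((xs.take j).sum))) (-1) 0 = xs.sum := by
      rw [PySem.List.pyGetD_neg_one _ _ hne, List.getLast_eq_getElem]
      simp
    have hmap : (List.range (xs.length + 1)).map (fun j => (((xs ++ [x]).take j).sum))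
        = (List.range (xs.length + 1)).map (fun j => ((xs.take j).sum)) := by
      apply List.map_congr_left
      intro j hj
      rw [List.take_append_of_le_length (Nat.lt_succ_iff.mp (List.mem_range.mp hj))]
    have htake : (xs ++ [x]).take (xs.length + 1) = xs ++ [x] :=
      List.take_of_length_le (by simp)
    rw [hlast]
    conv_rhs => rw [List.range_succ, List.map_append, hmap]
    simp [htake]
-- Indexing B's prefix list gives a partial sum.
theorem pv_prefix_get (skills : List Int) (m : Int) (h0 : 0 ≤ m) (hm : m ≤ (skills.length : Int)) :
    PySem.List.pyGetD ((List.range (skills.length + 1)).map (fun j => ((skills.take j).sum))) m 0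
      = (skills.take m.toNat).sum := by
  rw [PySem.List.pyGetD_eq_getElem _ 0 h0 (by simp; omega)]
  simp

-- A's window sum equals B's prefix-sum difference.
theorem pv_sum_eq (skills : List Int) (i k : Int) (h0 : 0 ≤ i) (hk : 0 ≤ k) :
    (PySem.List.slice skills (some i) (some (i + k))).sum
      = (skills.take (i + k).toNat).sum - (skills.take i.toNat).sum := by
  rw [PySem.List.slice_toNat _ h0 (by omega)]
  have h : (skills.take (i + k).toNat).sum
      = (skills.take i.toNat).sum + ((skills.drop i.toNat).take ((i + k).toNat - i.toNat)).sum := by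
    have hn : (i + k).toNat = i.toNat + ((i + k).toNat - i.toNat) := by omega
    rw [← List.sum_append, ← List.take_add]
    conv_lhs => rw [hn]
  rw [h]
  ring

-- A's set-subset test on the window equals B's min/max comparison.
theorem pv_subset_eq (team : List Int) (i k : Int) :
    PySem.Set.issubset (PySem.Set.ofList team) ((PySem.List.pyRange 0 k 1).map (fun x => x + i + 1))
      = (team.isEmpty || (decide ((PySem.List.max? team (fun x => x)).getD 0 - k ≤ i) &&
                          decide (i ≤ (PySem.List.min? team (fun x => x)).getD 0 - 1))) := by
  by_cases hte : team = []
  · subst hte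
    simp [PySem.Set.issubset_iff]
  · obtain ⟨mx, hmx⟩ : ∃ m, PySem.List.max? team (fun x => x) = some m := by
      cases h : PySem.List.max? team (fun x => x) with
      | none => exact absurd ((PySem.List.max?_eq_none_iff _ _).mp h) hte
      | some m => exact ⟨m, rfl⟩
    obtain ⟨mn, hmn⟩ : ∃ m, PySem.List.min? team (fun x => x) = some m := by
      cases h : PySem.List.min? team (fun x => x) with
      | none => exact absurd ((PySem.List.min?_eq_none_iff _ _).mp h) hte
      | some m => exact ⟨m, rfl⟩
    rw [Bool.eq_iff_iff, PySem.Set.issubset_iff]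
    simp [PySem.Set.mem_ofList, List.mem_map, PySem.List.mem_pyRange_one, hmx, hmn, hte]
    constructor
    · intro h
      obtain ⟨y1, hy1, he1⟩ := h mx (PySem.List.max?_mem hmx)
      obtain ⟨y2, hy2, he2⟩ := h mn (PySem.List.min?_mem hmn)
      omega
    · intro h t ht
      have h1 := PySem.List.max?_isMax hmx t ht
      have h2 := PySem.List.min?_isMin hmn t ht
      exact ⟨t - i - 1, by omega, by omega⟩

-- ===== VERDICT (by name: the statement is the Claim_ definition above) =====
theorem solution_spec : Claim_equal_solution := by
  intro skills team k _ hk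
  have hk0 : (0 : Int) ≤ k := hk
  unfold Spec_solution
  simp only [solution, solution_alt]
  rw [pv_prefix_eq]
  refine PySem.List.foldl_congr_mem' _ _ _ _ ?_
  intro i hi answer
  have hmem := PySem.List.mem_pyRange_one.mp hi
  have h0 : 0 ≤ i := hmem.1
  have hup : i < (skills.length : Int) - k + 1 := hmem.2
  have h1 : i + k ≤ (skills.length : Int) := by omega
  rw [pv_subset_eq, pv_sum_eq skills i k h0 hk0,
      pv_prefix_get skills (i + k) (by omega) h1,
      pv_prefix_get skills i h0 (by omega)]
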